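-- pv_equiv track=rewrite | github.com/chelseaChen0104/world_model_termination_spa | scripts/sudoku_scripts/save_sft_dataset.py | _char_to_token_idx
-- ===== SOURCE A (Python) =====
-- from typing import Any, Dict, Iterator, List, Optional, Tuple
--
-- def _char_to_token_idx(offsets: List[Tuple[int, int]], char_pos: int) -> Optional[int]:
--     for i, (s, e) in enumerate(offsets):
--         if s == char_pos:
--             return i
--     for i, (s, e) in enumerate(offsets):
--         if s <= char_pos < e:
--             return i
--     return None
-- ===== SOURCE B (Python) =====
-- from typing import List, Optional, Tuple
--
-- def _char_to_token_idx(offsets: List[Tuple[int, int]], char_pos: int) -> Optional[int]: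
--     found = None
--     for i, (s, e) in enumerate(offsets):
--         if s == char_pos:
--             return i
--         if found is None and s <= char_pos < e:
--             found = i
--     return found
-- ===== Notes on version B (the rewrite author's own statement) =====
-- stated objective: alternative
-- what changed: Replaces A's two sequential scans (first for an exact start match, then for a containing interval) by a single pass that returns immediately on an exact start match while remembering the first containing interval in an accumulator.
import Mathlib
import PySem

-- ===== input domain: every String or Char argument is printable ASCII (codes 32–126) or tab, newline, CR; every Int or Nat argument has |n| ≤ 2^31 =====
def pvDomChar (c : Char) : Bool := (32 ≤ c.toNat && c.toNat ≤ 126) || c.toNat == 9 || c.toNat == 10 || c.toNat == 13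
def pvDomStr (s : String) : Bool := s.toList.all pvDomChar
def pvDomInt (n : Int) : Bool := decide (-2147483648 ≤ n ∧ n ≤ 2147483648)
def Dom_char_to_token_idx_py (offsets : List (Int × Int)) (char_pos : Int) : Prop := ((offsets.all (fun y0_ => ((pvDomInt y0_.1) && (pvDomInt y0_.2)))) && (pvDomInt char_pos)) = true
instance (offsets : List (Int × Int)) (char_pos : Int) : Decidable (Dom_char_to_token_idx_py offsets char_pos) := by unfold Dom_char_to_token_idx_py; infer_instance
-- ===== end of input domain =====

-- B merges A's two sequential scans into one pass with a `found` accumulator; objective: alternative (same cost).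

-- ===== PORT A =====
-- first loop of A: return i at the first pair with s == char_pos
def pvAExact (offsets : List (Int × Int)) (i : Int) (char_pos : Int) : Option Int :=
  match offsets with
  | [] => none
  | (s, _) :: rest => if s = char_pos then some i else pvAExact rest (i + 1) char_pos

-- second loop of A: return i at the first pair with s <= char_pos < e
def pvAContain (offsets : List (Int × Int)) (i : Int) (char_pos : Int) : Option Int :=
  match offsets with
  | [] => none
  | (s, e) :: rest => if s ≤ char_pos ∧ char_pos < e then some i else pvAContain rest (i + 1) char_pos

def char_to_token_idx_py (offsets : List (Int × Int)) (char_pos : Int) : Option Int :=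
  match pvAExact offsets 0 char_pos with
  | some i => some i
  | none => pvAContain offsets 0 char_pos

-- ===== PORT B =====
-- single pass: return i immediately on exact start match; remember the first containing interval
def pvBLoop (offsets : List (Int × Int)) (i : Int) (char_pos : Int) (found : Option Int) : Option Int :=
  match offsets with
  | [] => found
  | (s, e) :: rest =>
    if s = char_pos then some i
    else pvBLoop rest (i + 1) char_pos
      (if found = none ∧ s ≤ char_pos ∧ char_pos < e then some i else found)

def char_to_token_idx_py_alt (offsets : List (Int × Int)) (char_pos : Int) : Option Int :=
  pvBLoop offsets 0 char_pos none

-- ===== PRECONDITION & SPEC =====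
def Spec_char_to_token_idx_py (offsets : List (Int × Int)) (char_pos : Int) (out : Option Int) : Prop := out = char_to_token_idx_py_alt offsets char_pos
instance (offsets : List (Int × Int)) (char_pos : Int) (out : Option Int) : Decidable (Spec_char_to_token_idx_py offsets char_pos out) := by unfold Spec_char_to_token_idx_py; infer_instance

-- ===== CLAIM (what is proved, stated in full; the proofs are below) =====
def Claim_equal_char_to_token_idx_py : Prop := ∀ (offsets : List (Int × Int)) (char_pos : Int), Dom_char_to_token_idx_py offsets char_pos → Spec_char_to_token_idx_py offsets char_pos (char_to_token_idx_py offsets char_pos)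

-- ===== LEMMAS AND PROOFS =====

-- with `found = some f`, B's loop equals: first exact match, else f
theorem pvBLoop_some (offsets : List (Int × Int)) (i : Int) (c : Int) (f : Int) :
    pvBLoop offsets i c (some f) =
      (match pvAExact offsets i c with
       | some j => some j
       | none => some f) := by
  induction offsets generalizing i with
  | nil => simp [pvBLoop, pvAExact]
  | cons p rest ih =>
    obtain ⟨s, e⟩ := p
    by_cases h : s = c <;> simp [pvBLoop, pvAExact, h, ih]

-- with `found = none`, B's loop equals A's two scans
theorem pvBLoop_none (offsets : List (Int × Int)) (i : Int) (c : Int) :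
    pvBLoop offsets i c none =
      (match pvAExact offsets i c with
       | some j => some j
       | none => pvAContain offsets i c) := by
  induction offsets generalizing i with
  | nil => simp [pvBLoop, pvAExact, pvAContain]
  | cons p rest ih =>
    obtain ⟨s, e⟩ := p
    by_cases h : s = c
    · simp [pvBLoop, pvAExact, h]
    · by_cases hc : s ≤ c ∧ c < e
      · have hne : s ≠ c := h
        simp [pvBLoop, pvAExact, pvAContain, hne, hc, pvBLoop_some]
      · simp [pvBLoop, pvAExact, pvAContain, h, hc, ih]

-- ===== VERDICT (by name: the statement is the Claim_ definition above) =====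
theorem char_to_token_idx_py_spec : Claim_equal_char_to_token_idx_py := by
  intro offsets char_pos _
  unfold Spec_char_to_token_idx_py char_to_token_idx_py char_to_token_idx_py_alt
  rw [pvBLoop_none]
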